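-- pv_equiv track=rewrite | github.com/zarzouram/lt2316-h20-aa2 | aa1/data_loading.py | __combine_tokens
-- ===== SOURCE A (Python) =====
-- def __combine_tokens(seq, loc):
--     token_new = [seq[0]]
--     start, end = zip(*loc)
--     diff = [a - b for a, b in zip(end[:-1], start[1:])]
--     for i, d in enumerate(diff):
--         if d == 0:
--             temp = token_new[-1] + seq[i+1]
--             token_new[-1] = temp
--         else:
--             token_new.append(seq[i+1])
--
--     return token_new
-- ===== SOURCE B (Python) =====
-- def __combine_tokens(seq, loc):
--     # Two-pass decomposition: first group consecutive indices into runs of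
--     # touching tokens, then reduce each run with '+'.
--     runs = [[seq[0]]]
--     for i in range(1, len(loc)):
--         if loc[i - 1][1] - loc[i][0] == 0:
--             runs[-1].append(seq[i])
--         else:
--             runs.append([seq[i]])
--     out = []
--     for run in runs:
--         acc = run[0]
--         for t in run[1:]:
--             acc = acc + t
--         out.append(acc)
--     return out
-- ===== Notes on version B (the rewrite author's own statement) =====
-- stated objective: alternative
-- what changed: Replaces A's single loop that mutates the last output element over a precomputed offset-difference list with a two-pass decomposition: first group consecutive tokens into runs whose boundaries touch, then reduce each run with '+'.
import Mathlib
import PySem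

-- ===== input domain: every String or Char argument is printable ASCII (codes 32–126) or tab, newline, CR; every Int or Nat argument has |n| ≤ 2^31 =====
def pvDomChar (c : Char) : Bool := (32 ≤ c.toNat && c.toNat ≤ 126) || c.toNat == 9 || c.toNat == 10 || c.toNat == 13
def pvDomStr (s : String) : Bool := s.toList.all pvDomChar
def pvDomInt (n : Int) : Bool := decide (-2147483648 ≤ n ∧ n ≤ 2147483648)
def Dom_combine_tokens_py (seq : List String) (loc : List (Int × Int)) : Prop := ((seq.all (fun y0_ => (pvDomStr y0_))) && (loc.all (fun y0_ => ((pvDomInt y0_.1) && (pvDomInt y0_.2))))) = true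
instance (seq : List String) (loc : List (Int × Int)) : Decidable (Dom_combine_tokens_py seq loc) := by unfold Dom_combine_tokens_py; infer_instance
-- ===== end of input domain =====

-- B regroups the tokens in two passes (runs of touching tokens, then a '+'-fold per run)
-- instead of A's single in-place last-element-mutating loop over the offset differences;
-- objective: alternative decomposition (same asymptotic cost). Equality of RETURN values is
-- what is proved; neither program mutates its arguments.

-- ===== PORT A =====
def combine_tokens_py (seq : List String) (loc : List (Int × Int)) : List String :=
  -- token_new = [seq[0]]  (Pre_ guarantees seq ≠ []; pyGet? none only outside Pre_)
  let token0 := (PySem.List.pyGet? seq 0).getD ""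
  -- start, end = zip(*loc)
  let start := loc.map Prod.fst
  let end_ := loc.map Prod.snd
  -- diff = [a - b for a, b in zip(end[:-1], start[1:])]
  let diff := (List.zip (PySem.List.slice end_ none (some (-1))) (PySem.List.slice start (some 1) none)).map (fun ab => ab.1 - ab.2)
  -- for i, d in enumerate(diff): if d == 0: token_new[-1] += seq[i+1] else: token_new.append(seq[i+1])
  (PySem.List.enumerate diff 0).foldl
    (fun tn p =>
      if p.2 = 0 then
        tn.dropLast ++ [tn.getLast?.getD "" ++ (PySem.List.pyGet? seq (p.1 + 1)).getD ""]
      else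
        tn ++ [(PySem.List.pyGet? seq (p.1 + 1)).getD ""])
    [token0]

-- ===== PORT B =====
def combine_tokens_py_alt (seq : List String) (loc : List (Int × Int)) : List String :=
  -- runs = [[seq[0]]]
  let tok0 := (PySem.List.pyGet? seq 0).getD ""
  -- for i in range(1, len(loc)): grow the last run if boundaries touch, else open a new run
  let runs := (PySem.List.pyRange 1 (loc.length : Int) 1).foldl
    (fun rs i =>
      if ((PySem.List.pyGet? loc (i - 1)).getD (0, 0)).2 - ((PySem.List.pyGet? loc i).getD (0, 0)).1 = 0 then
        rs.dropLast ++ [rs.getLast?.getD [] ++ [(PySem.List.pyGet? seq i).getD ""]]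
      else
        rs ++ [[(PySem.List.pyGet? seq i).getD ""]])
    [[tok0]]
  -- second pass: reduce each run with '+' (acc = run[0]; for t in run[1:]: acc = acc + t)
  runs.map (fun run =>
    (PySem.List.slice run (some 1) none).foldl (fun acc t => acc ++ t)
      ((PySem.List.pyGet? run 0).getD ""))

-- ===== PRECONDITION & SPEC =====
-- Pre_ is exactly where the Python A returns: seq = [] raises IndexError (seq[0]); loc = []
-- raises ValueError (zip(*loc) unpacking); loc longer than seq raises IndexError (seq[i+1]).
def Pre_combine_tokens_py (seq : List String) (loc : List (Int × Int)) : Prop :=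
  seq ≠ [] ∧ loc ≠ [] ∧ loc.length ≤ seq.length
instance (seq : List String) (loc : List (Int × Int)) : Decidable (Pre_combine_tokens_py seq loc) := by unfold Pre_combine_tokens_py; infer_instance
def pvWitness_combine_tokens_py : List String × (List (Int × Int)) := (["ab", "c", "d"], [(0, 2), (2, 3), (5, 6)])

def Spec_combine_tokens_py (seq : List String) (loc : List (Int × Int)) (out : List String) : Prop := out = combine_tokens_py_alt seq loc
instance (seq : List String) (loc : List (Int × Int)) (out : List String) : Decidable (Spec_combine_tokens_py seq loc out) := by unfold Spec_combine_tokens_py; infer_instance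

-- ===== CLAIM (what is proved, stated in full; the proofs are below) =====
def Claim_equal_combine_tokens_py : Prop := ∀ (seq : List String) (loc : List (Int × Int)), Dom_combine_tokens_py seq loc → Pre_combine_tokens_py seq loc → Spec_combine_tokens_py seq loc (combine_tokens_py seq loc)

-- ===== LEMMAS AND PROOFS =====

-- the common token/difference pair list both loops traverse
def pvTok (seq : List String) (k : Nat) : String := (PySem.List.pyGet? seq ((k : Int) + 1)).getD ""
def pvPairs (seq : List String) (loc : List (Int × Int)) : List (String × Int) :=
  (List.range (loc.length - 1)).map
    (fun k => (pvTok seq k, (loc[k]?.getD (0, 0)).2 - (loc[k + 1]?.getD (0, 0)).1))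

-- abstract forms of the two loop bodies
def pvStepA (tn : List String) (p : String × Int) : List String :=
  if p.2 = 0 then tn.dropLast ++ [tn.getLast?.getD "" ++ p.1] else tn ++ [p.1]
def pvStepB (rs : List (List String)) (p : String × Int) : List (List String) :=
  if p.2 = 0 then rs.dropLast ++ [rs.getLast?.getD [] ++ [p.1]] else rs ++ [[p.1]]
def pvRedB (run : List String) : String :=
  (PySem.List.slice run (some 1) none).foldl (fun acc t => acc ++ t)
    ((PySem.List.pyGet? run 0).getD "")

theorem pvRedB_cons (h : String) (t : List String) :
    pvRedB (h :: t) = t.foldl (fun acc x => acc ++ x) h := by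
  simp [pvRedB, PySem.List.slice_from_one]

theorem pvRedB_append_singleton (run : List String) (hr : run ≠ []) (t : String) :
    pvRedB (run ++ [t]) = pvRedB run ++ t := by
  cases run with
  | nil => exact absurd rfl hr
  | cons h tt => simp [pvRedB_cons, List.foldl_append]

theorem pvMain (ps : List (String × Int)) (runs : List (List String))
    (hne : runs ≠ []) (hall : ∀ r ∈ runs, r ≠ []) :
    ps.foldl pvStepA (runs.map pvRedB) = (ps.foldl pvStepB runs).map pvRedB := by
  induction ps generalizing runs with
  | nil => rfl
  | cons p ps ih =>
    have hL : runs.getLast? = some (runs.getLast hne) := List.getLast?_eq_some_getLast ..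
    have hstep : pvStepA (runs.map pvRedB) p = (pvStepB runs p).map pvRedB := by
      unfold pvStepA pvStepB
      split_ifs with h
      · have hLne : runs.getLast hne ≠ [] := hall _ (List.getLast_mem hne)
        simp [← List.map_dropLast, List.getLast?_map, hL,
          pvRedB_append_singleton _ hLne]
      · simp [pvRedB_cons]
    have hne' : pvStepB runs p ≠ [] := by
      unfold pvStepB; split_ifs <;> simp
    have hall' : ∀ r ∈ pvStepB runs p, r ≠ [] := by
      intro r hr
      unfold pvStepB at hr
      split_ifs at hr <;> rcases List.mem_append.mp hr with h' | h'
      · exact hall _ (List.dropLast_subset _ h')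
      · simp at h'; subst h'; simp
      · exact hall _ h'
      · simp at h'; subst h'; simp
    simpa [List.foldl_cons, hstep] using ih (pvStepB runs p) hne' hall'

theorem pvA_eq (seq : List String) (loc : List (Int × Int)) :
    combine_tokens_py seq loc
      = (pvPairs seq loc).foldl pvStepA [(PySem.List.pyGet? seq 0).getD ""] := by
  unfold combine_tokens_py
  have hmap :
      (PySem.List.enumerate
          ((List.zip (PySem.List.slice (loc.map Prod.snd) none (some (-1)))
              (PySem.List.slice (loc.map Prod.fst) (some 1) none)).map
            (fun ab => ab.1 - ab.2)) 0).map
        (fun p => ((PySem.List.pyGet? seq (p.1 + 1)).getD "", p.2))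
        = pvPairs seq loc := by
    apply List.ext_getElem
    · simp [PySem.List.length_enumerate, PySem.List.slice_to_neg_one,
        PySem.List.slice_from_one, pvPairs, List.length_zip]
      try omega
    · intro k h1 h2
      have hk : k < loc.length - 1 := by
        simpa [pvPairs] using h2
      have hk1 : k + 1 < loc.length := by omega
      simp [PySem.List.getElem_enumerate, PySem.List.slice_to_neg_one,
        PySem.List.slice_from_one, pvPairs, pvTok, List.getElem_zip,
        List.getElem_dropLast, List.getElem_tail,
        List.getElem?_eq_getElem (by omega : k < loc.length),
        List.getElem?_eq_getElem hk1]
  rw [← hmap, List.foldl_map]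
  rfl

theorem pvB_eq (seq : List String) (loc : List (Int × Int)) :
    combine_tokens_py_alt seq loc
      = ((pvPairs seq loc).foldl pvStepB [[(PySem.List.pyGet? seq 0).getD ""]]).map pvRedB := by
  have hlen : (((loc.length : Int)) - 1).toNat = loc.length - 1 := by omega
  show (((PySem.List.pyRange 1 (loc.length : Int) 1).foldl
      (fun rs i =>
        if ((PySem.List.pyGet? loc (i - 1)).getD (0, 0)).2
            - ((PySem.List.pyGet? loc i).getD (0, 0)).1 = 0 then
          rs.dropLast ++ [rs.getLast?.getD [] ++ [(PySem.List.pyGet? seq i).getD ""]]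
        else
          rs ++ [[(PySem.List.pyGet? seq i).getD ""]])
      [[(PySem.List.pyGet? seq 0).getD ""]]).map pvRedB)
    = ((pvPairs seq loc).foldl pvStepB [[(PySem.List.pyGet? seq 0).getD ""]]).map pvRedB
  rw [PySem.List.pyRange_one, hlen, List.foldl_map]
  congr 1
  rw [pvPairs, List.foldl_map]
  apply PySem.List.foldl_congr_mem
  intro rs k hk
  have hk' : k < loc.length - 1 := List.mem_range.mp hk
  have e1 : (1 : Int) + k - 1 = ((k : Nat) : Int) := by omega
  have e2 : (1 : Int) + k = (((k + 1 : Nat)) : Int) := by push_cast; omega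
  rw [e1, e2]
  have e3 : ((k : Nat) : Int) + 1 = (((k + 1 : Nat)) : Int) := by push_cast; ring
  rw [pvStepB, pvTok, e3]
  simp only [PySem.List.pyGet?_natCast]

-- ===== VERDICT (by name: the statement is the Claim_ definition above) =====
theorem combine_tokens_py_spec : Claim_equal_combine_tokens_py := by
  intro seq loc _ _
  unfold Spec_combine_tokens_py
  rw [pvA_eq, pvB_eq]
  have := pvMain (pvPairs seq loc) [[(PySem.List.pyGet? seq 0).getD ""]]
    (by simp) (by simp)
  simpa [pvRedB_cons] using this
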